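-- pv_equiv track=rewrite | github.com/PLHGNAOH/py4e | ex_C-1.14.py | odd_product
-- ===== SOURCE A (Python) =====
-- def odd_product(sequence):
--     for i in range(len (sequence)):
--         for j in range(len(sequence)):
--             if i != j :
--                 product= sequence[i] * sequence[j]
--                 if product % 2 == 1:
--                     return True
--     return False
-- ===== SOURCE B (Python) =====
-- def odd_product(sequence):
--     # product of two distinct-position elements is odd iff both are odd,
--     # so: at least two odd elements (one pass).
--     return sum(1 for x in sequence if x % 2 != 0) >= 2
-- ===== Notes on version B (the rewrite author's own statement) =====
-- stated objective: alternative
-- what changed: Replaced the all-pairs product scan by a single pass that counts odd elements and returns True iff at least two are odd (a product of two elements is odd iff both factors are odd).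
import Mathlib
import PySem

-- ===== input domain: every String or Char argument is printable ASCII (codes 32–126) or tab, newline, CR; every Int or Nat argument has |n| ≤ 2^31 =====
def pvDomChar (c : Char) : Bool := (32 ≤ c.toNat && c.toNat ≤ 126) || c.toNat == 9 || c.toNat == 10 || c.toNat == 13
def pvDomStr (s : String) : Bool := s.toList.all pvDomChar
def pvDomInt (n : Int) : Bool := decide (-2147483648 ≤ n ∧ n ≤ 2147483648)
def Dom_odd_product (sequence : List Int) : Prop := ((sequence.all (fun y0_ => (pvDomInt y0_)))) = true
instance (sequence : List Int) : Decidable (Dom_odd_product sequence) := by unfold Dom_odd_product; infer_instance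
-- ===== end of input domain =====

-- B counts odd elements in a single pass and returns True iff at least two are odd, instead of A's scan over all index pairs (a product of two elements is odd iff both factors are odd).

-- ===== PORT A =====
-- for i in range(len(sequence)): for j in range(len(sequence)): if i != j and sequence[i]*sequence[j] % 2 == 1: return True; return False
-- (indices i, j produced by range are always in range, so getD i 0 is exactly sequence[i])
def odd_product (sequence : List Int) : Bool :=
  (List.range sequence.length).any (fun i =>
    (List.range sequence.length).any (fun j =>
      if i ≠ j then
        PySem.Int.mod ((sequence.getD i 0) * (sequence.getD j 0)) 2 == 1
      else false))

-- ===== PORT B =====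
-- sum(1 for x in sequence if x % 2 != 0) >= 2
def odd_product_alt (sequence : List Int) : Bool :=
  decide (2 ≤ sequence.countP (fun x => PySem.Int.mod x 2 != 0))

-- ===== PRECONDITION & SPEC =====
def Spec_odd_product (sequence : List Int) (out : Bool) : Prop := out = odd_product_alt sequence
instance (sequence : List Int) (out : Bool) : Decidable (Spec_odd_product sequence out) := by unfold Spec_odd_product; infer_instance

-- ===== CLAIM (what is proved, stated in full; the proofs are below) =====
def Claim_equal_odd_product : Prop := ∀ (sequence : List Int), Dom_odd_product sequence → Spec_odd_product sequence (odd_product sequence)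

-- ===== LEMMAS AND PROOFS =====

-- Python's a % 2 with positive divisor is Lean's emod
theorem pymod2 (a : Int) : PySem.Int.mod a 2 = a % 2 :=
  PySem.Int.mod_eq_emod_of_pos (by norm_num)

-- a product is odd iff both factors are odd
theorem odd_mul_iff (a b : Int) :
    PySem.Int.mod (a * b) 2 = 1 ↔ (a % 2 = 1 ∧ b % 2 = 1) := by
  rw [pymod2, Int.mul_emod]
  rcases Int.emod_two_eq a with ha | ha <;> rcases Int.emod_two_eq b with hb | hb <;>
    simp [ha, hb]

-- the element test of B, resolved by parity
theorem podd_true {a : Int} (h : a % 2 = 1) : (PySem.Int.mod a 2 != 0) = true := by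
  rw [pymod2 a, h]; decide

theorem podd_false {a : Int} (h : ¬ a % 2 = 1) : (PySem.Int.mod a 2 != 0) = false := by
  have h0 : a % 2 = 0 := by omega
  rw [pymod2 a, h0]; decide

-- two odd positions give at least two odd elements
theorem two_idx_le_countP (s : List Int) (i j : Nat) (hij : i < j) (hj : j < s.length)
    (hi1 : (s.getD i 0) % 2 = 1) (hj1 : (s.getD j 0) % 2 = 1) :
    2 ≤ s.countP (fun x => PySem.Int.mod x 2 != 0) := by
  induction s generalizing i j with
  | nil => simp at hj
  | cons a t ih =>
    have hc := List.countP_cons (p := fun x => PySem.Int.mod x 2 != 0) (a := a) (l := t)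
    cases j with
    | zero => omega
    | succ m =>
      cases i with
      | zero =>
        simp only [List.getD_cons_zero] at hi1
        simp only [List.getD_cons_succ] at hj1
        have hm : m < t.length := by simpa using hj
        have hmem : t.getD m 0 ∈ t := by
          rw [List.getD_eq_getElem t 0 hm]; exact List.getElem_mem hm
        have h1 : 0 < t.countP (fun x => PySem.Int.mod x 2 != 0) :=
          List.countP_pos_iff.mpr ⟨t.getD m 0, hmem, podd_true hj1⟩
        rw [hc, if_pos (podd_true hi1)]
        omega
      | succ k =>
        have h2 := ih k m (by omega) (by simpa using hj)
          (by simpa using hi1) (by simpa using hj1)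
        rw [hc]
        split <;> omega

-- at least two odd elements give two odd positions
theorem countP_to_two_idx (s : List Int)
    (h : 2 ≤ s.countP (fun x => PySem.Int.mod x 2 != 0)) :
    ∃ i j, i < j ∧ j < s.length ∧ (s.getD i 0) % 2 = 1 ∧ (s.getD j 0) % 2 = 1 := by
  induction s with
  | nil => simp at h
  | cons a t ih =>
    have hc := List.countP_cons (p := fun x => PySem.Int.mod x 2 != 0) (a := a) (l := t)
    by_cases ha : a % 2 = 1
    · rw [hc, if_pos (podd_true ha)] at h
      have h1 : 0 < t.countP (fun x => PySem.Int.mod x 2 != 0) := by omega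
      obtain ⟨x, hx, hpx⟩ := List.countP_pos_iff.mp h1
      obtain ⟨m, hm, hxm⟩ := List.mem_iff_getElem.mp hx
      refine ⟨0, m + 1, by omega, by simpa using hm, by simpa using ha, ?_⟩
      simp only [List.getD_cons_succ]
      rw [List.getD_eq_getElem t 0 hm, hxm]
      revert hpx
      rcases Int.emod_two_eq x with hx2 | hx2
      · rw [podd_false (by omega)]; simp
      · intro _; exact hx2
    · rw [hc, podd_false ha] at h
      simp only [Bool.false_eq_true, if_false, Nat.add_zero] at h
      obtain ⟨i, j, hij, hj, hi1, hj1⟩ := ih (by omega)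
      exact ⟨i + 1, j + 1, by omega, by simpa using hj,
        by simpa using hi1, by simpa using hj1⟩

-- ===== VERDICT (by name: the statement is the Claim_ definition above) =====
theorem odd_product_spec : Claim_equal_odd_product := by
  intro s _
  unfold Spec_odd_product odd_product odd_product_alt
  rw [Bool.eq_iff_iff]
  simp only [List.any_eq_true, List.mem_range, decide_eq_true_eq]
  constructor
  · rintro ⟨i, hi, j, hj, hc⟩
    rw [ite_eq_iff] at hc
    rcases hc with ⟨hne, hc⟩ | ⟨_, hc⟩
    · rw [beq_iff_eq, odd_mul_iff] at hc
      obtain ⟨h1, h2⟩ := hc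
      rcases Nat.lt_or_ge i j with hlt | hge
      · exact two_idx_le_countP s i j hlt hj h1 h2
      · exact two_idx_le_countP s j i (by omega) hi h2 h1
    · exact absurd hc (by simp)
  · intro h
    obtain ⟨i, j, hij, hj, hi1, hj1⟩ := countP_to_two_idx s h
    refine ⟨i, by omega, j, hj, ?_⟩
    rw [if_pos (by omega)]
    rw [beq_iff_eq, odd_mul_iff]
    exact ⟨hi1, hj1⟩
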